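-- pv_equiv track=rewrite | github.com/myuon/mylite | scripts/gen_features.py | group_by_category
-- ===== SOURCE A (Python) =====
-- from collections import OrderedDict
--
-- CATEGORY_ORDER = [
--     "Storage Engine",
--     "DML",
--     "DDL",
--     "SQL Statement",
--     "Transaction",
--     "Stored Program",
--     "Partitioning",
--     "Index",
--     "Auth",
--     "Prepared Statement",
--     "Metadata",
--     "Replication",
--     "CTE",
--     "Function",
--     "Charset",
-- ]
--
-- def group_by_category(features):
--     groups = OrderedDict()
--     # Insert in preferred order first
--     for cat in CATEGORY_ORDER:
--         groups[cat] = []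
--     # Then any leftover categories not in the order list
--     for f in features:
--         cat = f["category"]
--         if cat not in groups:
--             groups[cat] = []
--         groups[cat].append(f)
--     # Remove empty categories
--     return {k: v for k, v in groups.items() if v}
-- ===== SOURCE B (Python) =====
-- CATEGORY_ORDER = [
--     "Storage Engine",
--     "DML",
--     "DDL",
--     "SQL Statement",
--     "Transaction",
--     "Stored Program",
--     "Partitioning",
--     "Index",
--     "Auth",
--     "Prepared Statement",
--     "Metadata",
--     "Replication",
--     "CTE",
--     "Function",
--     "Charset",
-- ]
--
-- def group_by_category(features):
--     # No grouping dict at all: first compute the ordered list of category keys,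
--     # then select each category's features by a filter scan.
--     seen = []
--     for f in features:
--         c = f["category"]
--         if c not in seen:
--             seen.append(c)
--     ordered = [c for c in CATEGORY_ORDER if c in seen] \
--             + [c for c in seen if c not in CATEGORY_ORDER]
--     return {c: [f for f in features if f["category"] == c] for c in ordered}
-- ===== Notes on version B (the rewrite author's own statement) =====
-- stated objective: alternative
-- what changed: B uses no grouping dict: it first computes the ordered list of category keys (preferred categories that occur, then leftover categories in first-appearance order) and then builds each group by filtering the feature list per category, instead of accumulating per-category lists in an ordered dict and dropping the empty ones.
import Mathlib
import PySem

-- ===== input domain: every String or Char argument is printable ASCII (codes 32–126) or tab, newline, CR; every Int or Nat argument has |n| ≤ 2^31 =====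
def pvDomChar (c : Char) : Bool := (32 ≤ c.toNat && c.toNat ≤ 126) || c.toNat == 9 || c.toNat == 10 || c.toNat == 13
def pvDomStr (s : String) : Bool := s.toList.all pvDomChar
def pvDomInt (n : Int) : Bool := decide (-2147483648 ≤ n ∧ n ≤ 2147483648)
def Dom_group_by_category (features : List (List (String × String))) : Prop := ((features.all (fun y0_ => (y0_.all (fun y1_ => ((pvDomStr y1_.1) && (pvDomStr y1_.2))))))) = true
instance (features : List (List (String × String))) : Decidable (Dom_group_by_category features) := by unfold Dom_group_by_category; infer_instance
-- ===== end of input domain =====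

-- B uses no grouping dict: it computes the ordered list of category keys first, then
-- builds each group by filtering the feature list per category (objective: alternative;
-- B trades A's single accumulation pass for per-category filter scans).

def CATEGORY_ORDER : List String :=
  ["Storage Engine", "DML", "DDL", "SQL Statement", "Transaction", "Stored Program",
   "Partitioning", "Index", "Auth", "Prepared Statement", "Metadata", "Replication",
   "CTE", "Function", "Charset"]

-- f["category"] on an association-list dict: first match; none = Python's KeyError (excluded by Pre_)
def catOf (f : List (String × String)) : Option String :=
  (PySem.Dict.mk f).get? "category"

-- ===== PORT A =====
-- groups = OrderedDict(); for cat in CATEGORY_ORDER: groups[cat] = []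
def aSeed : PySem.Dict String (List (List (String × String))) :=
  CATEGORY_ORDER.foldl (fun d c => d.insert c []) PySem.Dict.empty

-- for f in features: cat = f["category"]; if cat not in groups: groups[cat] = []; groups[cat].append(f)
def aFill (features : List (List (String × String))) : PySem.Dict String (List (List (String × String))) :=
  features.foldl (fun d f =>
    match catOf f with
    | none => d      -- Python raises KeyError here; excluded by Pre_
    | some c =>
      (if d.contains c then d else d.insert c []).modify c [] (fun v => v ++ [f])) aSeed

-- return {k: v for k, v in groups.items() if v}
def group_by_category (features : List (List (String × String))) : List (String × List (List (String × String))) :=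
  (aFill features).items.filter (fun p => !p.2.isEmpty)

-- ===== PORT B =====
-- seen = []; for f in features: c = f["category"]; if c not in seen: seen.append(c)
def bSeen (features : List (List (String × String))) : PySem.Set String :=
  features.foldl (fun s f =>
    match catOf f with
    | none => s      -- Python raises KeyError here; excluded by Pre_
    | some c => PySem.Set.add s c) PySem.Set.empty

-- ordered = [c for c in CATEGORY_ORDER if c in seen] + [c for c in seen if c not in CATEGORY_ORDER]
-- return {c: [f for f in features if f["category"] == c] for c in ordered}  (keys are distinct)
def group_by_category_alt (features : List (List (String × String))) : List (String × List (List (String × String))) :=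
  (CATEGORY_ORDER.filter (fun c => PySem.Set.contains (bSeen features) c)
    ++ (bSeen features).filter (fun c => !CATEGORY_ORDER.contains c)).map
      (fun c => (c, features.filter (fun f => catOf f == some c)))

-- ===== PRECONDITION & SPEC =====
-- Pre_ excludes exactly the inputs where some feature dict has no "category" key: there
-- Python A raises KeyError (and B raises too).
def Pre_group_by_category (features : List (List (String × String))) : Prop :=
  ∀ f ∈ features, ((PySem.Dict.mk f).get? "category").isSome = true
instance (features : List (List (String × String))) : Decidable (Pre_group_by_category features) := by
  unfold Pre_group_by_category; infer_instance

def pvWitness_group_by_category : (List (List (String × String))) :=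
  [[("category", "DML"), ("name", "insert")], [("category", "Weird"), ("name", "x")]]

def Spec_group_by_category (features : List (List (String × String))) (out : List (String × List (List (String × String)))) : Prop := out = group_by_category_alt features
instance (features : List (List (String × String))) (out : List (String × List (List (String × String)))) : Decidable (Spec_group_by_category features out) := by unfold Spec_group_by_category; infer_instance

-- ===== CLAIM =====
def Claim_equal_group_by_category : Prop := ∀ (features : List (List (String × String))), Dom_group_by_category features → Pre_group_by_category features → Spec_group_by_category features (group_by_category features)

-- ===== LEMMAS AND PROOFS =====

-- the category key of a feature, total form (under Pre_, catOf f = some (keyOf f))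
def keyOf (f : List (String × String)) : String := ((PySem.Dict.mk f).get? "category").getD ""

def pairsOf (features : List (List (String × String))) : List (String × List (String × String)) :=
  features.map (fun f => (keyOf f, f))

-- the group value of category c
def valOf (features : List (List (String × String))) (c : String) : List (List (String × String)) :=
  features.filter (fun f => keyOf f == c)

-- A's setdefault-then-append step collapses to a single modify
theorem stepA_eq (d : PySem.Dict String (List (List (String × String)))) (c : String)
    (f : List (String × String)) :
    (if d.contains c then d else d.insert c []).modify c [] (fun v => v ++ [f])
      = d.modify c [] (fun v => v ++ [f]) := by
  by_cases h : d.contains c = true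
  · simp [h]
  · simp only [Bool.not_eq_true] at h
    simp [h, PySem.Dict.modify, PySem.Dict.getD_insert_self, PySem.Dict.insert_insert_self,
      PySem.Dict.getD_of_not_contains _ _ h]

-- under Pre_, A's grouping loop is the canonical modify-fold over (key, feature) pairs
theorem loopA_eq (features : List (List (String × String)))
    (h : Pre_group_by_category features) :
    aFill features
      = (pairsOf features).foldl (fun d p => d.modify p.1 [] (fun v => v ++ [p.2])) aSeed := by
  unfold aFill pairsOf
  rw [List.foldl_map]
  refine PySem.List.foldl_congr_mem _ _ _ _ ?_
  intro acc f hf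
  obtain ⟨c, hc⟩ := Option.isSome_iff_exists.mp (h f hf)
  simp only [catOf, keyOf, hc, Option.getD_some, stepA_eq]

-- A's seed dict maps everything to []
theorem getD_seed (l : List String) (d : PySem.Dict String (List (List (String × String))))
    (h : ∀ x, d.getD x [] = []) (x : String) :
    (l.foldl (fun d c => d.insert c []) d).getD x [] = [] := by
  induction l generalizing d with
  | nil => exact h x
  | cons c l ih =>
    simp only [List.foldl_cons]
    refine ih _ (fun y => ?_)
    rw [PySem.Dict.getD_insert]
    split <;> simp [h]

-- the grouping fold's value at c is valOf
theorem getD_grouped (features : List (List (String × String)))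
    (d : PySem.Dict String (List (List (String × String))))
    (h : ∀ x, d.getD x [] = []) (c : String) :
    ((pairsOf features).foldl (fun d p => d.modify p.1 [] (fun v => v ++ [p.2])) d).getD c []
      = valOf features c := by
  rw [PySem.Dict.getD_foldl_modify_append, h]
  unfold pairsOf valOf
  simp [List.filter_map, Function.comp_def]

-- a category's group is non-empty iff the category occurs
theorem val_ne_iff_mem (features : List (List (String × String))) (c : String) :
    (!(valOf features c).isEmpty) = decide (c ∈ features.map keyOf) := by
  induction features with
  | nil => simp [valOf]
  | cons f l ih =>
    unfold valOf at ih ⊢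
    simp only [List.filter_cons, List.map_cons, List.mem_cons]
    by_cases h : keyOf f = c
    · simp [h]
    · have hb : (keyOf f == c) = false := by simp [h]
      have hne : ¬ c = keyOf f := fun he => h he.symm
      simp [hb, hne, ih]

theorem order_nodup : CATEGORY_ORDER.Nodup := by decide

-- A's result is: occurring preferred categories, then leftover categories in first-appearance
-- order, each paired with its filtered group
theorem A_characterization (features : List (List (String × String)))
    (hpre : Pre_group_by_category features) :
    group_by_category features
      = (CATEGORY_ORDER.filter (fun c => decide (c ∈ features.map keyOf))
          ++ (PySem.Set.ofList (features.map keyOf)).filter (fun c => !CATEGORY_ORDER.contains c)).map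
            (fun c => (c, valOf features c)) := by
  unfold group_by_category
  rw [loopA_eq features hpre]
  set cats : List String := features.map keyOf with hcats
  have hg0keys : aSeed.keys = CATEGORY_ORDER := by decide
  have hg0getD : ∀ x, aSeed.getD x [] = [] := fun x =>
    getD_seed _ _ (fun y => by simp [PySem.Dict.getD_empty]) x
  set gA := (pairsOf features).foldl (fun d p => d.modify p.1 [] (fun v => v ++ [p.2])) aSeed
    with hgA
  have hAkeys : gA.keys = PySem.Set.update CATEGORY_ORDER cats := by
    rw [hgA, PySem.Dict.keys_foldl_modify_key (pairsOf features)
      (fun p : String × List (String × String) => p.1) [] (fun d p => fun v => v ++ [p.2]),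
      hg0keys]
    unfold pairsOf
    simp [hcats, Function.comp_def]
  have hAnd : gA.keys.Nodup := by
    rw [hgA]
    exact PySem.Dict.nodup_keys_foldl_modify_key _
      (fun p : String × List (String × String) => p.1) [] _ _ (hg0keys ▸ order_nodup)
  have hAgetD : ∀ c, gA.getD c [] = valOf features c := fun c =>
    getD_grouped features aSeed hg0getD c
  have hAitems : gA.items = (PySem.Set.update CATEGORY_ORDER cats).map
      (fun c => (c, valOf features c)) := by
    rw [PySem.Dict.items_eq_map_keys gA hAnd [], hAkeys]
    exact List.map_congr_left (fun c _ => by rw [hAgetD])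
  rw [hAitems, PySem.Set.update_eq_append_filter, List.map_append, List.filter_append,
    List.filter_map, List.filter_map, List.filter_filter, List.map_append]
  congr 2
  · exact List.filter_congr (fun c _ => by
      simp only [Function.comp_def]; rw [val_ne_iff_mem features c, hcats])
  · refine List.filter_congr (fun c hc => ?_)
    have hm : c ∈ cats := (PySem.Set.mem_ofList cats c).mp hc
    rw [hcats] at hm
    simp only [Function.comp_def, val_ne_iff_mem features c]
    simp [hm]

-- under Pre_, B's seen list is the distinct category keys in first-appearance order
theorem bSeen_eq (features : List (List (String × String)))
    (h : Pre_group_by_category features) :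
    bSeen features = PySem.Set.ofList (features.map keyOf) := by
  unfold bSeen
  rw [PySem.Set.ofList_eq_foldl, List.foldl_map]
  refine PySem.List.foldl_congr_mem _ _ _ _ ?_
  intro acc f hf
  obtain ⟨c, hc⟩ := Option.isSome_iff_exists.mp (h f hf)
  simp only [catOf, keyOf, hc, Option.getD_some]

-- under Pre_, B's per-category filter is valOf
theorem bFilter_eq (features : List (List (String × String)))
    (h : Pre_group_by_category features) (c : String) :
    features.filter (fun f => catOf f == some c) = valOf features c := by
  unfold valOf
  refine List.filter_congr (fun f hf => ?_)
  obtain ⟨c', hc'⟩ := Option.isSome_iff_exists.mp (h f hf)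
  simp [catOf, keyOf, hc']

-- main equivalence on Pre_
theorem main_eq (features : List (List (String × String)))
    (hpre : Pre_group_by_category features) :
    group_by_category features = group_by_category_alt features := by
  rw [A_characterization features hpre]
  unfold group_by_category_alt
  rw [bSeen_eq features hpre]
  have hfun : (fun c => (c, features.filter (fun f => catOf f == some c)))
      = fun c => (c, valOf features c) := funext fun c => by rw [bFilter_eq features hpre]
  rw [hfun]
  congr 2
  refine List.filter_congr (fun c _ => ?_)
  simp [PySem.Set.contains, PySem.Set.mem_ofList]

-- ===== VERDICT =====
theorem group_by_category_spec : Claim_equal_group_by_category := by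
  intro features _ hpre
  unfold Spec_group_by_category
  exact main_eq features hpre
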